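-- pv_equiv track=rewrite | github.com/anurag9601/brocode_challenge | 2025/python/9_september/5_sep.py | find_closest_delivery_partner
-- ===== SOURCE A (Python) =====
-- def find_closest_delivery_partner(partners, orders):
--     assign_orders = []
--
--     for i in orders:
--         if len(partners) == 1 and len(orders) == 1:
--             assign_orders.append(partners[0])
--             return assign_orders
--         else:
--             difference = float('inf')
--             partner = 0
--             for j in partners:
--                 if abs(i - j) < difference:
--                     difference = abs(i - j)
--                     partner = j
--             assign_orders.append(partner)
--     return assign_orders
-- ===== SOURCE B (Python) =====
-- def find_closest_delivery_partner(partners, orders):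
--     # Partner-major sweep: one pass over partners rebuilding a per-order best
--     # (difference, partner) table; strict < keeps the first-seen partner on ties.
--     best = [(float('inf'), 0)] * len(orders)
--     for j in partners:
--         best = [(abs(i - j), j) if abs(i - j) < d else (d, p)
--                 for (d, p), i in zip(best, orders)]
--     return [p for _, p in best]
-- ===== Notes on version B (the rewrite author's own statement) =====
-- stated objective: alternative
-- what changed: B interchanges the loops: a single sweep over partners rebuilds a per-order best (difference, partner) table, instead of A's per-order rescan of all partners with an inner argmin loop (and A's special-cased 1x1 early return disappears).
import Mathlib
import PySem

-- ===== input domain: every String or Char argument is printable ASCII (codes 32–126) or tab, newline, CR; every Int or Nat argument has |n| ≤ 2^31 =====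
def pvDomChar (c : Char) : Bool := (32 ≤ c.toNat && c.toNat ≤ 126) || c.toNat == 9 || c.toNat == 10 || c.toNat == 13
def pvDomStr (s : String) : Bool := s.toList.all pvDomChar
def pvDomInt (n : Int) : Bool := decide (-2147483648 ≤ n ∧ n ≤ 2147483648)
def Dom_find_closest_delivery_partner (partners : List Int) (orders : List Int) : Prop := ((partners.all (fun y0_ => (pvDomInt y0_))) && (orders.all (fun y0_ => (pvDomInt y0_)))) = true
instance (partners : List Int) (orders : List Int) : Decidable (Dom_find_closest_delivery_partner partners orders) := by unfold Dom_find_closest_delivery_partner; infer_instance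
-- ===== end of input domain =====

-- B interchanges the two loops: one sweep over partners updates a per-order best table
-- (same O(P·O) cost, a different traversal; proved equal on every input).

-- ===== PORT A =====
-- inner loop state: (difference, partner); `none` plays float('inf')
def pvAStep (i : Int) (s : Option Int × Int) (j : Int) : Option Int × Int :=
  match s.1 with
  | none => (some |i - j|, j)
  | some d => if |i - j| < d then (some |i - j|, j) else s

def pvInnerA (i : Int) (partners : List Int) : Int :=
  (partners.foldl (pvAStep i) (none, 0)).2

-- the `for i in orders` loop with its constant-condition early return
def pvALoop (partners ordersAll : List Int) (acc : List Int) : List Int → List Int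
  | [] => acc
  | i :: rest =>
    if partners.length = 1 ∧ ordersAll.length = 1 then
      -- partners[0]; in this branch partners.length = 1 so pyGet? is some (getD exact)
      acc ++ [(PySem.List.pyGet? partners 0).getD 0]
    else pvALoop partners ordersAll (acc ++ [pvInnerA i partners]) rest

def find_closest_delivery_partner (partners : List Int) (orders : List Int) : List Int :=
  pvALoop partners orders [] orders

-- ===== PORT B =====
-- one table slot: (difference, partner); `none` plays float('inf')
def pvSlot (i : Int) (b : Option Int × Int) (j : Int) : Option Int × Int :=
  if (match b.1 with | none => true | some d => decide (|i - j| < d)) = true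
  then (some |i - j|, j) else b

-- the comprehension over zip(best, orders)
def pvBStep (orders : List Int) (best : List (Option Int × Int)) (j : Int) :
    List (Option Int × Int) :=
  (best.zip orders).map (fun bi => pvSlot bi.2 bi.1 j)

def find_closest_delivery_partner_alt (partners : List Int) (orders : List Int) : List Int :=
  ((partners.foldl (pvBStep orders)
      (List.replicate orders.length ((none : Option Int), (0 : Int)))).map (·.2))

-- ===== PRECONDITION & SPEC =====
def Spec_find_closest_delivery_partner (partners : List Int) (orders : List Int) (out : List Int) : Prop := out = find_closest_delivery_partner_alt partners orders
instance (partners : List Int) (orders : List Int) (out : List Int) : Decidable (Spec_find_closest_delivery_partner partners orders out) := by unfold Spec_find_closest_delivery_partner; infer_instance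

-- ===== CLAIM (what is proved, stated in full; the proofs are below) =====
def Claim_equal_find_closest_delivery_partner : Prop := ∀ (partners : List Int) (orders : List Int), Dom_find_closest_delivery_partner partners orders → Spec_find_closest_delivery_partner partners orders (find_closest_delivery_partner partners orders)

-- ===== LEMMAS AND PROOFS =====

theorem pvSlot_eq_aStep (i : Int) (b : Option Int × Int) (j : Int) :
    pvSlot i b j = pvAStep i b j := by
  rcases b with ⟨d?, p⟩
  cases d? with
  | none => rfl
  | some d => simp only [pvSlot, pvAStep]; split_ifs <;> simp_all

theorem pvBStep_map (orders : List Int) (g : Int → Option Int × Int) (j : Int) :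
    pvBStep orders (orders.map g) j = orders.map (fun i => pvAStep i (g i) j) := by
  induction orders with
  | nil => rfl
  | cons i t ih =>
    simp only [pvBStep, pvSlot_eq_aStep] at ih ⊢
    simp only [List.map_cons, List.zip_cons_cons, List.map_cons] at *
    simp [ih]

theorem pvFoldB_map (ps orders : List Int) (g : Int → Option Int × Int) :
    ps.foldl (pvBStep orders) (orders.map g) =
      orders.map (fun i => ps.foldl (pvAStep i) (g i)) := by
  induction ps generalizing g with
  | nil => rfl
  | cons j t ih =>
    simp only [List.foldl_cons, pvBStep_map]
    exact ih (fun i => pvAStep i (g i) j)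

theorem pvAlt_eq_map (partners orders : List Int) :
    find_closest_delivery_partner_alt partners orders =
      orders.map (fun i => pvInnerA i partners) := by
  unfold find_closest_delivery_partner_alt
  rw [← List.map_const', pvFoldB_map]
  simp [List.map_map, Function.comp, pvInnerA]

theorem pvALoop_eq (partners ordersAll : List Int)
    (h : ¬ (partners.length = 1 ∧ ordersAll.length = 1)) (rest acc : List Int) :
    pvALoop partners ordersAll acc rest = acc ++ rest.map (fun i => pvInnerA i partners) := by
  induction rest generalizing acc with
  | nil => simp [pvALoop]
  | cons i t ih => simp [pvALoop, if_neg h, ih]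

-- ===== VERDICT (by name: the statement is the Claim_ definition above) =====
theorem find_closest_delivery_partner_spec : Claim_equal_find_closest_delivery_partner := by
  intro partners orders _dom
  unfold Spec_find_closest_delivery_partner
  rw [pvAlt_eq_map]
  by_cases h : partners.length = 1 ∧ orders.length = 1
  · obtain ⟨hp, ho⟩ := h
    obtain ⟨p, rfl⟩ := List.length_eq_one_iff.mp hp
    obtain ⟨i, rfl⟩ := List.length_eq_one_iff.mp ho
    simp [find_closest_delivery_partner, pvALoop, pvInnerA, pvAStep,
      PySem.List.pyGet?, PySem.List.pyIdx?]
  · simp [find_closest_delivery_partner, pvALoop_eq partners orders h]
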